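-- pv_equiv track=rewrite | github.com/wandsdn/ofequivalence | ofequivalence/headerspace.py | wc_int_to_string
-- ===== SOURCE A (Python) =====
-- def wc_int_to_string(tint):
--     """ tint: The ternary integer for (we'll really a quaternary however
--               we don't expect a z)
--     """
--     as_str = ""
--     while tint:
--         part = tint & 3
--         assert part
--         if part == 1:
--             as_str += '0'
--         elif part == 2:
--             as_str += '1'
--         else:
--             assert part == 3
--             as_str += 'x'
--         tint >>= 2
--     as_str = as_str[::-1]
--     return as_str
-- ===== SOURCE B (Python) =====
-- def wc_int_to_string(tint):
--     """ tint: The ternary integer for (we'll really a quaternary however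
--               we don't expect a z)
--     """
--     if tint <= 0:
--         return ""
--     ndigits = (tint.bit_length() + 1) // 2
--     return ''.join('01x'[((tint >> 2 * k) & 3) - 1]
--                    for k in range(ndigits - 1, -1, -1))
-- ===== Notes on version B (the rewrite author's own statement) =====
-- stated objective: simpler
-- what changed: B emits the digits most-significant-first, driving an index down from the top base-4 position computed via bit_length, instead of A's accumulate-least-significant-then-reverse loop with repeated string concatenation.
import Mathlib
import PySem

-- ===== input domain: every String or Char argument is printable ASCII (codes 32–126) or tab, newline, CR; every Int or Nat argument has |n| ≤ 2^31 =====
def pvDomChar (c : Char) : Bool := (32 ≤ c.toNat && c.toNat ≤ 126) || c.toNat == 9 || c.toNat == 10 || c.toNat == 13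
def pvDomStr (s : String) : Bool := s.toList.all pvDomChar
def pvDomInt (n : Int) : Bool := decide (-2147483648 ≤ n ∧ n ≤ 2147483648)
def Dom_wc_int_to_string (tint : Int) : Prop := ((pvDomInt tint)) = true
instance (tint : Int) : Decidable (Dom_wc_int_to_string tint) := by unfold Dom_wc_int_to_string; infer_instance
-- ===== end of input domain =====

-- B builds the string most-significant-digit-first from bit_length, so no accumulate-then-reverse; same values, no speed claim.

-- ===== PORT A =====
-- A's while loop; fuel is only a totality guard (within Dom, |tint| ≤ 2^31 < 4^40, so 40 steps always suffice).
def wcLoopA : Nat → Int → List Char → List Char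
  | 0, _, acc => acc
  | fuel+1, t, acc =>
    if t = 0 then acc
    else
      let part := PySem.Int.band t 3                       -- tint & 3
      let c : Char := if part = 1 then '0'                 -- (the 'assert part' raise is excluded by Pre_)
                      else if part = 2 then '1'
                      else 'x'
      wcLoopA fuel (t >>> 2) (acc ++ [c])                  -- tint >>= 2

def wc_int_to_string (tint : Int) : String :=
  let as_str := wcLoopA 40 tint []
  String.ofList ((PySem.List.slice? as_str none none (-1)).getD [])   -- as_str[::-1]

-- ===== PORT B =====
def wc_int_to_string_alt (tint : Int) : String :=
  if tint ≤ 0 then "" else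
    let ndigits : Int := PySem.Int.floordiv ((PySem.Int.bitLength tint : Int) + 1) 2
    String.ofList ((PySem.List.pyRange (ndigits - 1) (-1) (-1)).map (fun k =>
      -- '01x'[((tint >> 2*k) & 3) - 1]; k ≥ 0 along this range so (2*k).toNat is exact,
      -- and the index is always in [-1, 2] so pyGet? is never none ('?' is unreachable)
      (PySem.Str.pyGet? "01x" (PySem.Int.band (tint >>> (2 * k).toNat) 3 - 1)).getD '?'))

-- ===== PRECONDITION & SPEC =====
-- Pre_ excludes exactly the inputs where Python A does not return: negative tint (A's while loop
-- never terminates) and nonnegative tint with a zero base-4 digit below the top one (A's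
-- 'assert part' raises AssertionError). Within Dom, |tint| ≤ 2^31 < 4^16, so the 16 digit
-- positions quantified over cover every digit of tint.
def Pre_wc_int_to_string (tint : Int) : Prop :=
  0 ≤ tint ∧ ∀ k : Nat, k < 16 → tint >>> (2 * k) ≠ 0 → PySem.Int.band (tint >>> (2 * k)) 3 ≠ 0
instance (tint : Int) : Decidable (Pre_wc_int_to_string tint) := by unfold Pre_wc_int_to_string; infer_instance

def pvWitness_wc_int_to_string : Int := (9)

def Spec_wc_int_to_string (tint : Int) (out : String) : Prop := out = wc_int_to_string_alt tint
instance (tint : Int) (out : String) : Decidable (Spec_wc_int_to_string tint out) := by unfold Spec_wc_int_to_string; infer_instance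

-- ===== CLAIM (what is proved, stated in full; the proofs are below) =====
def Claim_equal_wc_int_to_string : Prop := ∀ (tint : Int), Dom_wc_int_to_string tint → Pre_wc_int_to_string tint → Spec_wc_int_to_string tint (wc_int_to_string tint)

-- ===== LEMMAS AND PROOFS =====

-- proof-side name for the digit→char table both ports realize
def charOfN (d : Nat) : Char := if d = 1 then '0' else if d = 2 then '1' else 'x'

lemma charOfN_table (d : Nat) (hd : d < 4) :
    (PySem.Str.pyGet? "01x" ((d : Int) - 1)).getD '?' = charOfN d := by
  interval_cases d <;> decide

lemma nat_and_three (n : Nat) : n &&& 3 = n % 4 := by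
  have := Nat.and_two_pow_sub_one_eq_mod n 2
  norm_num at this
  omega

lemma band_three_natCast (n : Nat) : PySem.Int.band (n : Int) 3 = ((n % 4 : Nat) : Int) := by
  have h := PySem.Int.band_natCast n 3
  norm_num at h
  rw [h, nat_and_three]

lemma wcLoopA_eq (fuel : Nat) : ∀ (n : Nat) (acc : List Char), n < 4 ^ fuel →
    wcLoopA fuel (n : Int) acc = acc ++ (Nat.digits 4 n).map charOfN := by
  induction fuel with
  | zero => intro n acc h; interval_cases n; simp [wcLoopA]
  | succ f ih =>
    intro n acc h
    by_cases hn : n = 0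
    · subst hn; simp [wcLoopA]
    · have hpos : 0 < n := Nat.pos_of_ne_zero hn
      have hcast : ((n : Int)) ≠ 0 := by exact_mod_cast hn
      rw [wcLoopA, if_neg hcast]
      have hshift : (n : Int) >>> (2 : Int) = ((n / 4 : Nat) : Int) := by
        rw [(by norm_num : (2 : Int) = ((2 : Nat) : Int)), Int.shiftRight_natCast]
        norm_num [Nat.shiftRight_eq_div_pow]
      have hdiv : n / 4 < 4 ^ f := by
        apply Nat.div_lt_of_lt_mul
        have : 4 ^ (f + 1) = 4 ^ f * 4 := by ring
        omega
      have hchar : (if PySem.Int.band (n : Int) 3 = 1 then '0'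
                    else if PySem.Int.band (n : Int) 3 = 2 then '1' else 'x') = charOfN (n % 4) := by
        rw [band_three_natCast]
        have h4 : n % 4 < 4 := Nat.mod_lt _ (by norm_num)
        interval_cases h : n % 4 <;> simp [charOfN]
      simp only [hchar, hshift]
      rw [ih (n / 4) _ hdiv, Nat.digits_def' (by norm_num : 1 < 4) hpos]
      simp

lemma ndigits_eq (n : Nat) :
    PySem.Int.floordiv ((PySem.Int.bitLength (n : Int) : Int) + 1) 2
      = ((Nat.digits 4 n).length : Int) := by
  induction n using Nat.strong_induction_on with
  | _ n ih =>
    match n, ih with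
    | 0, _ => decide
    | 1, _ => decide
    | 2, _ => decide
    | 3, _ => decide
    | (m+4), ih =>
      set n := m + 4 with hn
      have h1 : 0 < n := by omega
      have h2 : 0 < n / 2 := by omega
      have hbl : PySem.Int.bitLength (n : Int)
          = PySem.Int.bitLength ((n / 4 : Nat) : Int) + 2 := by
        rw [PySem.Int.bitLength_natCast h1, PySem.Int.bitLength_natCast h2,
            Nat.div_div_eq_div_mul]
      have hd : Nat.digits 4 n = n % 4 :: Nat.digits 4 (n / 4) :=
        Nat.digits_def' (by norm_num : 1 < 4) h1
      have hrec := ih (n / 4) (by omega)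
      rw [hbl, hd]
      set B := PySem.Int.bitLength ((n / 4 : Nat) : Int) with hB
      rw [PySem.Int.floordiv_eq_ediv_of_pos (by norm_num)] at hrec ⊢
      simp only [List.length_cons]
      push_cast at hrec ⊢
      omega

lemma map_range_eq_reverse (n : Nat) :
    (PySem.List.pyRange (((Nat.digits 4 n).length : Int) - 1) (-1) (-1)).map (fun k =>
        (PySem.Str.pyGet? "01x" (PySem.Int.band ((n : Int) >>> (2 * k).toNat) 3 - 1)).getD '?')
      = ((Nat.digits 4 n).map charOfN).reverse := by
  set L := (Nat.digits 4 n).length with hL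
  rw [PySem.List.pyRange_neg_one]
  have hcnt : (((L : Int) - 1) - (-1)).toNat = L := by omega
  rw [hcnt, List.map_map]
  apply List.ext_getElem
  · simp [hL]
  · intro j hj hj'
    simp only [List.getElem_map, List.getElem_range, Function.comp_apply]
    have hjL : j < L := by simpa using hj
    have hi : ((L : Int) - 1 - (j : Int)) = ((L - 1 - j : Nat) : Int) := by omega
    set i := L - 1 - j with hidef
    have h2i : ((2 * ((L : Int) - 1 - (j : Int))).toNat) = 2 * i := by omega
    rw [h2i, Int.shiftRight_natCast]
    have hpow : n >>> (2 * i) = n / 4 ^ i := by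
      rw [Nat.shiftRight_eq_div_pow, pow_mul]
      norm_num
    rw [hpow, band_three_natCast]
    have hd4 : n / 4 ^ i % 4 < 4 := Nat.mod_lt _ (by norm_num)
    rw [charOfN_table _ hd4]
    rw [List.getElem_reverse]
    simp only [List.getElem_map]
    have hilt : i < L := by omega
    have hdigit := Nat.getD_digits n i (by norm_num : 2 ≤ 4)
    rw [List.getD_eq_getElem _ _ (by simpa [hL] using hilt)] at hdigit
    congr 1
    have hidx2 : (List.map charOfN (Nat.digits 4 n)).length - 1 - j = i := by
      rw [List.length_map]
    simp only [hidx2]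
    exact hdigit.symm

-- ===== VERDICT (by name: the statement is the Claim_ definition above) =====
theorem wc_int_to_string_spec : Claim_equal_wc_int_to_string := by
  intro tint hdom hpre
  unfold Spec_wc_int_to_string
  obtain ⟨hnn, -⟩ := hpre
  obtain ⟨n, rfl⟩ : ∃ n : Nat, tint = (n : Int) := ⟨tint.toNat, (Int.toNat_of_nonneg hnn).symm⟩
  have hbound : n < 4 ^ 40 := by
    unfold Dom_wc_int_to_string pvDomInt at hdom
    simp at hdom
    have hn : n ≤ 2147483648 := by exact_mod_cast hdom
    calc n ≤ 2147483648 := hn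
      _ < 4 ^ 40 := by norm_num
  rw [wc_int_to_string]
  simp only [PySem.List.slice?_none_none_neg_one, Option.getD_some]
  rw [wcLoopA_eq 40 n [] hbound]
  by_cases hz : n = 0
  · subst hz
    decide
  · have hpos : 0 < n := Nat.pos_of_ne_zero hz
    have hle : ¬ ((n : Int) ≤ 0) := by exact_mod_cast Nat.not_le.mpr hpos
    have halt : wc_int_to_string_alt (n : Int)
        = String.ofList (((Nat.digits 4 n).map charOfN).reverse) := by
      rw [wc_int_to_string_alt, if_neg hle]
      show String.ofList ((PySem.List.pyRange
          (PySem.Int.floordiv ((PySem.Int.bitLength ((n : Int)) : Int) + 1) 2 - 1) (-1) (-1)).map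
          (fun k => (PySem.Str.pyGet? "01x"
            (PySem.Int.band ((n : Int) >>> (2 * k).toNat) 3 - 1)).getD '?')) = _
      rw [ndigits_eq n, map_range_eq_reverse n]
    rw [halt]
    simp
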